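-- pv_equiv track=rewrite | github.com/Lovince27/Lovince-spiral-engine | 27_e_π_root2.py | blend_digits
-- ===== SOURCE A (Python) =====
-- def blend_digits(digit_lists):
--     """
--     Blend digits from multiple decimal digit strings by interleaving them.
--     """
--     blended = []
--     max_len = max(len(d) for d in digit_lists)
--     for i in range(max_len):
--         for digits in digit_lists:
--             if i < len(digits):
--                 blended.append(digits[i])
--     return ''.join(blended)
-- ===== SOURCE B (Python) =====
-- def blend_digits(digit_lists):
--     """
--     Blend digits from multiple decimal digit strings by interleaving them.
--
--     Column-peeling: keep one iterator per string; each round emits the next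
--     character of every still-alive iterator (one column) and drops exhausted
--     iterators. No indices, no per-element bounds checks.
--     """
--     iters = [iter(d) for d in digit_lists]
--     out = []
--     while iters:
--         alive = []
--         for it in iters:
--             ch = next(it, None)
--             if ch is not None:
--                 out.append(ch)
--                 alive.append(it)
--         iters = alive
--     return ''.join(out)
-- ===== Notes on version B (the rewrite author's own statement) =====
-- stated objective: alternative
-- what changed: Replaces the index-driven double loop (range over max length, per-element bounds check, digits[i]) with index-free column peeling over one iterator per string, dropping exhausted iterators each round.
import Mathlib
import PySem

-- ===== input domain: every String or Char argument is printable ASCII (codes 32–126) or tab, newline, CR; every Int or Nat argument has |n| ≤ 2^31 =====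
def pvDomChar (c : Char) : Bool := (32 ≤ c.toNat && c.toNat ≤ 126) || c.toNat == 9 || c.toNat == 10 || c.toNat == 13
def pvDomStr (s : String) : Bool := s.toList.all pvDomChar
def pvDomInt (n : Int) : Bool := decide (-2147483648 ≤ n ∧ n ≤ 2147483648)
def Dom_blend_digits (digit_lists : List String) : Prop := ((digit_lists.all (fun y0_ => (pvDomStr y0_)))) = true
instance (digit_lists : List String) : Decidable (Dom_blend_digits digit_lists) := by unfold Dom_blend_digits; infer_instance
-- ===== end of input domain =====

-- B replaces A's index-driven double loop (range over the max length with a per-element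
-- bounds check) by index-free column peeling over per-string iterators; same cost, no indices.


-- ===== PORT A =====
def blend_digits (digit_lists : List String) : String :=
  let max_len : Int := (PySem.List.max? (digit_lists.map PySem.Str.len) id).getD 0
  let blended : List Char :=
    (PySem.List.pyRange 0 max_len).foldl (fun acc i =>
      digit_lists.foldl (fun acc2 digits =>
        if i < PySem.Str.len digits then acc2 ++ (PySem.Str.pyGet? digits i).toList else acc2)
        acc) []
  String.mk blended

-- ===== PORT B =====
-- the iterators still alive after one round: the nonempty ones, each advanced by one character
def pvAlive (L : List (List Char)) : List (List Char) :=
  (L.filter (fun t => !t.isEmpty)).map List.tail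

-- termination measure for the peeling loop: total remaining characters + number of live iterators
def pvPeelMeasure (L : List (List Char)) : Nat := (L.map List.length).sum + L.length

theorem pvPeelMeasure_alive_le (L : List (List Char)) :
    pvPeelMeasure (pvAlive L) ≤ pvPeelMeasure L := by
  induction L with
  | nil => simp [pvPeelMeasure, pvAlive]
  | cons t rest ih =>
    cases t with
    | nil => simp [pvPeelMeasure, pvAlive, List.filter] at *; omega
    | cons c cs => simp [pvPeelMeasure, pvAlive, List.filter] at *; omega

theorem pvPeelMeasure_alive_lt (L : List (List Char)) (h : L ≠ []) :
    pvPeelMeasure (pvAlive L) < pvPeelMeasure L := by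
  cases L with
  | nil => exact absurd rfl h
  | cons t rest =>
    have hr := pvPeelMeasure_alive_le rest
    cases t with
    | nil => simp [pvPeelMeasure, pvAlive, List.filter] at *; omega
    | cons c cs => simp [pvPeelMeasure, pvAlive, List.filter] at *; omega

-- one round of Source B's while loop: emit the next char of every live iterator, drop exhausted ones
def blendLoop (iters : List (List Char)) : List Char :=
  if h : iters = [] then []
  else iters.filterMap List.head? ++ blendLoop (pvAlive iters)
termination_by pvPeelMeasure iters
decreasing_by exact pvPeelMeasure_alive_lt iters h

def blend_digits_alt (digit_lists : List String) : String :=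
  String.mk (blendLoop (digit_lists.map String.toList))

-- ===== PRECONDITION & SPEC =====
-- Pre_ excludes only the empty list, on which A's max() raises ValueError.
def Pre_blend_digits (digit_lists : List String) : Prop := digit_lists ≠ []
instance (digit_lists : List String) : Decidable (Pre_blend_digits digit_lists) := by unfold Pre_blend_digits; infer_instance
def pvWitness_blend_digits : List String := (["12", "345"])

def Spec_blend_digits (digit_lists : List String) (out : String) : Prop := out = blend_digits_alt digit_lists
instance (digit_lists : List String) (out : String) : Decidable (Spec_blend_digits digit_lists out) := by unfold Spec_blend_digits; infer_instance

-- ===== CLAIM (what is proved, stated in full; the proofs are below) =====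
def Claim_equal_blend_digits : Prop := ∀ (digit_lists : List String), Dom_blend_digits digit_lists → Pre_blend_digits digit_lists → Spec_blend_digits digit_lists (blend_digits digit_lists)

-- ===== LEMMAS AND PROOFS =====

-- column i: the i-th character of every string long enough, in list order
def colAt (L : List (List Char)) (i : Nat) : List Char := L.filterMap (fun t => t[i]?)
def natMax (ns : List Nat) : Nat := ns.foldr max 0
def lensOf (L : List (List Char)) : List Nat := L.map List.length

theorem colAt_eq_flatMap (L : List String) (k : Nat) :
    colAt (L.map String.toList) k = L.flatMap (fun d => (d.toList[k]?).toList) := by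
  induction L with
  | nil => simp [colAt]
  | cons d ds ih =>
    cases h2 : d.toList[k]? <;> simp [colAt, h2] at * <;> simpa [colAt] using ih

theorem innerFold_eq (L : List String) (k : Nat) (acc : List Char) :
    L.foldl (fun acc2 digits =>
        if (k : Int) < PySem.Str.len digits then acc2 ++ (PySem.Str.pyGet? digits (k : Int)).toList else acc2) acc
      = acc ++ colAt (L.map String.toList) k := by
  have hfun : (fun (acc2 : List Char) (digits : String) =>
      if (k : Int) < PySem.Str.len digits then acc2 ++ (PySem.Str.pyGet? digits (k : Int)).toList else acc2)
      = fun acc2 digits => acc2 ++ (digits.toList[k]?).toList := by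
    funext acc2 digits
    by_cases h : k < digits.toList.length
    · rw [if_pos (by rw [PySem.Str.len_eq]; omega), PySem.Str.pyGet?_natCast]
    · rw [if_neg (by rw [PySem.Str.len_eq]; omega), List.getElem?_eq_none (by omega)]
      simp
  rw [hfun, PySem.List.foldl_append_eq_flatMap, colAt_eq_flatMap]

theorem outerFold_eq (L : List String) (ks : List Nat) (acc : List Char) :
    ks.foldl (fun (acc : List Char) (k : Nat) =>
        L.foldl (fun acc2 digits =>
          if (k : Int) < PySem.Str.len digits then acc2 ++ (PySem.Str.pyGet? digits (k : Int)).toList else acc2) acc) acc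
      = acc ++ ks.flatMap (fun k => colAt (L.map String.toList) k) := by
  induction ks generalizing acc with
  | nil => simp
  | cons k ks ih =>
    simp only [List.foldl_cons, List.flatMap_cons]
    rw [innerFold_eq, ih, List.append_assoc]

theorem colAt_zero (L : List (List Char)) : colAt L 0 = L.filterMap List.head? := by
  unfold colAt
  congr 1
  funext t
  cases t <;> simp

theorem colAt_succ (L : List (List Char)) (i : Nat) :
    colAt (pvAlive L) i = colAt L (i + 1) := by
  induction L with
  | nil => simp [colAt, pvAlive]
  | cons t rest ih =>
    cases t with
    | nil => simpa [colAt, pvAlive, List.filter] using ih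
    | cons c cs =>
      have h1 : pvAlive ((c :: cs) :: rest) = cs :: pvAlive rest := by
        simp [pvAlive, List.filter]
      rw [h1]
      simp only [colAt, List.filterMap_cons, List.getElem?_cons_succ]
      cases h2 : cs[i]? <;> simpa [colAt, h2] using ih

theorem natMax_alive (L : List (List Char)) :
    natMax (lensOf (pvAlive L)) = natMax (lensOf L) - 1 := by
  induction L with
  | nil => simp [natMax, lensOf, pvAlive]
  | cons t rest ih =>
    cases t with
    | nil => simp [natMax, lensOf, pvAlive, List.filter] at *; omega
    | cons c cs => simp [natMax, lensOf, pvAlive, List.filter] at *; omega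

theorem natMax_zero_colAt (L : List (List Char)) (h : natMax (lensOf L) = 0) :
    colAt L 0 = [] := by
  induction L with
  | nil => simp [colAt]
  | cons t rest ih =>
    simp [natMax, lensOf] at h
    have ht : t = [] := h.1
    subst ht
    simp only [colAt, List.filterMap_cons]
    simpa [colAt] using ih (by simp [natMax, lensOf, h.2])

theorem blendLoop_eq (L : List (List Char)) :
    blendLoop L = (List.range (natMax (lensOf L))).flatMap (colAt L) := by
  induction L using blendLoop.induct with
  | case1 => simp [blendLoop, natMax, lensOf]
  | case2 L h ih =>
    rw [blendLoop]
    simp only [dif_neg h]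
    rw [ih, natMax_alive]
    cases hm : natMax (lensOf L) with
    | zero =>
      simp only [Nat.zero_sub, List.range_zero, List.flatMap_nil, List.append_nil]
      rw [← colAt_zero, natMax_zero_colAt L hm]
    | succ m =>
      rw [List.range_succ_eq_map]
      simp only [Nat.succ_sub_one, List.flatMap_cons, List.flatMap_map]
      rw [← colAt_zero]
      congr 1
      exact List.flatMap_congr (fun i _ => colAt_succ L i)

theorem max?_id_cons (xs : List Int) :
    ∀ x : Int, PySem.List.max? (x :: xs) id = some (xs.foldl max x) := by
  induction xs with
  | nil => intro x; simp [PySem.List.max?]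
  | cons y ys ih =>
    intro x
    have h := ih (max x y)
    simp only [PySem.List.max?, id_eq, List.foldl_cons] at h ⊢
    by_cases hxy : x < y
    · have hm : max x y = y := by omega
      simpa [hxy, hm] using h
    · have hm : max x y = x := by omega
      simpa [hxy, hm] using h

theorem foldl_max_cast (ns : List Nat) :
    ∀ a : Nat, (ns.map (fun (n : Nat) => (n : Int))).foldl max (a : Int) = ((ns.foldl max a : Nat) : Int) := by
  induction ns with
  | nil => intro a; simp
  | cons n ns ih =>
    intro a
    simp only [List.map_cons, List.foldl_cons]
    rw [← Nat.cast_max, ih]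

theorem foldl_max_natMax (ns : List Nat) :
    ∀ a : Nat, ns.foldl max a = max a (natMax ns) := by
  induction ns with
  | nil => intro a; simp [natMax]
  | cons n ns ih =>
    intro a
    simp only [List.foldl_cons, natMax, List.foldr_cons]
    rw [ih]
    simp only [natMax]
    omega

theorem maxLen_eq (d : String) (ds : List String) :
    (PySem.List.max? ((d :: ds).map PySem.Str.len) id).getD 0
      = ((natMax (lensOf ((d :: ds).map String.toList)) : Nat) : Int) := by
  have hmap : ds.map PySem.Str.len = (ds.map (fun s => s.toList.length)).map (fun (n : Nat) => (n : Int)) := by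
    simp [PySem.Str.len_eq, Function.comp]
  simp only [List.map_cons]
  rw [max?_id_cons, PySem.Str.len_eq d, hmap, foldl_max_cast, foldl_max_natMax]
  simp [natMax, lensOf, List.map_map, Function.comp_def]

-- ===== VERDICT (by name: the statement is the Claim_ definition above) =====
theorem blend_digits_spec : Claim_equal_blend_digits := by
  intro digit_lists _ hpre
  unfold Spec_blend_digits
  cases digit_lists with
  | nil => exact absurd rfl hpre
  | cons d ds =>
    simp only [blend_digits, blend_digits_alt]
    rw [blendLoop_eq, maxLen_eq, PySem.List.pyRange_zero_natCast]
    simp only [List.foldl_map]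
    rw [outerFold_eq]
    simp
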